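-- pv_equiv track=rewrite | github.com/SkBlaz/tax2vec | build/lib/tax2vec/preprocessing.py | countCharacterFlooding
-- ===== SOURCE A (Python) =====
-- from itertools import groupby
--
-- def countCharacterFlooding(text):
--     text = ''.join(text.split())
--     groups = groupby(text)
--     cnt = 0
--     for label, group in groups:
--         char_cnt = sum(1 for _ in group)
--         if char_cnt > 2:
--             cnt += 1
--     return cnt
-- ===== SOURCE B (Python) =====
-- def countCharacterFlooding(text):
--     s = ''.join(text.split())
--     n = len(s)
--     cnt = 0
--     for i in range(n - 2):
--         if s[i] == s[i + 1] == s[i + 2] and (i == 0 or s[i - 1] != s[i]):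
--             cnt += 1
--     return cnt
-- ===== Notes on version B (the rewrite author's own statement) =====
-- stated objective: alternative
-- what changed: Replaces the itertools.groupby pass that materialises each run as a generator and sums its length with a positional scan counting indices that start a triple (s[i]==s[i+1]==s[i+2] with a different or absent left neighbour), so no grouping or per-run length counter is maintained.
import Mathlib
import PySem

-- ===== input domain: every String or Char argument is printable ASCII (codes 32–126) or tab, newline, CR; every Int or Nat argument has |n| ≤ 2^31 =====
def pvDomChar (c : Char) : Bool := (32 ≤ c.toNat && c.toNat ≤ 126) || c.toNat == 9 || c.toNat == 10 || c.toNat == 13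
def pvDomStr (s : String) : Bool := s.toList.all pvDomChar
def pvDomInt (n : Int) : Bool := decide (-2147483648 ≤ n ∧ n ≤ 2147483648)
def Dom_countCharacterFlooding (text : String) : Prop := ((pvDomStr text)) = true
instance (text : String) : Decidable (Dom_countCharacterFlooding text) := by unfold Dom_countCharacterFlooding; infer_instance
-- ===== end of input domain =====

-- B replaces A's groupby run-length pass with a positional triple scan counting run starts; alternative, same cost.

-- ===== PORT A =====
-- transcription of 'for label, group in groupby(text): char_cnt = sum(1 for _ in group); if char_cnt > 2: cnt += 1'
-- as a state machine carrying the current group's label, its running length and the counter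
def pvALoop : List Char → Char → Int → Int → Int
  | [], _, run, cnt => if run > 2 then cnt + 1 else cnt
  | c :: rest, cur, run, cnt =>
      if c = cur then pvALoop rest cur (run + 1) cnt
      else pvALoop rest c 1 (if run > 2 then cnt + 1 else cnt)

def countCharacterFlooding (text : String) : Int :=
  let cleaned := PySem.Chars.join [] (PySem.Chars.split₀ text.toList)
  match cleaned with
  | [] => 0
  | c :: rest => pvALoop rest c 1 0

-- ===== PORT B =====
def countCharacterFlooding_alt (text : String) : Int :=
  let s := PySem.Chars.join [] (PySem.Chars.split₀ text.toList)
  let n : Int := s.length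
  (PySem.List.pyRange 0 (n - 2) 1).foldl
    (fun cnt i =>
      if ((PySem.List.pyGetD s i ' ' == PySem.List.pyGetD s (i + 1) ' ' &&
           PySem.List.pyGetD s (i + 1) ' ' == PySem.List.pyGetD s (i + 2) ' ') &&
          (i == 0 || PySem.List.pyGetD s (i - 1) ' ' != PySem.List.pyGetD s i ' '))
      then cnt + 1 else cnt) 0

-- ===== PRECONDITION & SPEC =====
def Spec_countCharacterFlooding (text : String) (out : Int) : Prop := out = countCharacterFlooding_alt text
instance (text : String) (out : Int) : Decidable (Spec_countCharacterFlooding text out) := by unfold Spec_countCharacterFlooding; infer_instance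

-- ===== CLAIM (what is proved, stated in full; the proofs are below) =====
def Claim_equal_countCharacterFlooding : Prop := ∀ (text : String), Dom_countCharacterFlooding text → Spec_countCharacterFlooding text (countCharacterFlooding text)

-- ===== LEMMAS AND PROOFS =====

-- length of the maximal leading block of c's
def pvLead (c : Char) : List Char → Nat
  | [] => 0
  | a :: rest => if a = c then pvLead c rest + 1 else 0

-- reference count: runs of length > 2, scanned one character at a time with a lookback character
def pvG : Option Char → List Char → Int
  | _, [] => 0
  | prev, a :: rest => (if 2 ≤ pvLead a rest ∧ prev ≠ some a then 1 else 0) + pvG (some a) rest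

-- B's per-index predicate, with the lookback made explicit
def pvPp (prev : Option Char) (s : List Char) (k : Nat) : Bool :=
  (s.getD k ' ' == s.getD (k + 1) ' ' && s.getD (k + 1) ' ' == s.getD (k + 2) ' ') &&
  (match k with
   | 0 => prev != some (s.getD 0 ' ')
   | j + 1 => s.getD j ' ' != s.getD (j + 1) ' ')

lemma pvTwoLead (a : Char) (s : List Char) (h : 2 ≤ s.length) :
    (2 ≤ pvLead a s) ↔ (s.getD 0 ' ' = a ∧ s.getD 1 ' ' = a) := by
  match s, h with
  | b :: c :: t, _ =>
    simp only [pvLead, List.getD_cons_zero, List.getD_cons_succ]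
    split_ifs <;> simp_all

lemma pvLead_le (c : Char) : ∀ s : List Char, pvLead c s ≤ s.length
  | [] => by simp [pvLead]
  | a :: t => by
      simp only [pvLead, List.length_cons]
      split_ifs
      · have := pvLead_le c t; omega
      · omega

lemma pvALoop_eq (rest : List Char) : ∀ (cur : Char) (run cnt : Int), 1 ≤ run →
    pvALoop rest cur run cnt =
      cnt + (if 3 ≤ run + (pvLead cur rest : Int) then 1 else 0) + pvG (some cur) rest := by
  induction rest with
  | nil =>
    intro cur run cnt _
    simp only [pvALoop, pvLead, pvG]
    split_ifs <;> omega
  | cons c rest ih =>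
    intro cur run cnt h
    by_cases hc : c = cur
    · subst hc
      rw [pvALoop]
      simp only [if_true]
      rw [ih c (run + 1) cnt (by omega)]
      simp only [pvLead, if_true, pvG]
      have hne : ¬ (2 ≤ pvLead c rest ∧ some c ≠ some c) := by simp
      rw [if_neg hne]
      push_cast
      split_ifs <;> omega
    · rw [pvALoop]
      rw [if_neg hc]
      rw [ih c 1 _ (by omega)]
      simp only [pvLead, if_neg hc, pvG]
      have h2 : (2 ≤ pvLead c rest ∧ some cur ≠ some c) ↔ 2 ≤ pvLead c rest := by
        simp [Ne.symm hc]
      rw [if_congr h2 rfl rfl]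
      push_cast
      split_ifs <;> omega

lemma pvMain (s : List Char) :
    (match s with
     | [] => (0 : Int)
     | c :: rest => pvALoop rest c 1 0) = pvG none s := by
  cases s with
  | nil => rfl
  | cons c rest =>
    show pvALoop rest c 1 0 = _
    rw [pvALoop_eq rest c 1 0 (by omega), pvG]
    have h2 : (2 ≤ pvLead c rest ∧ (none : Option Char) ≠ some c) ↔ 2 ≤ pvLead c rest := by simp
    rw [if_congr h2 rfl rfl]
    split_ifs <;> omega

lemma pvPp_succ (prev : Option Char) (a : Char) (s : List Char) (k : Nat) :
    pvPp prev (a :: s) (k + 1) = pvPp (some a) s k := by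
  cases k with
  | zero =>
    simp only [pvPp, List.getD_cons_succ, List.getD_cons_zero]
    rw [Bool.eq_iff_iff]
    simp
  | succ j => simp [pvPp]

lemma pvCnt_eq (s : List Char) : ∀ prev,
    (((List.range (s.length - 2)).countP (pvPp prev s) : Nat) : Int) = pvG prev s := by
  induction s with
  | nil => intro prev; simp [pvG]
  | cons a s ih =>
    intro prev
    rw [pvG]
    by_cases h2 : 2 ≤ s.length
    · have hm : (a :: s).length - 2 = (s.length - 2) + 1 := by simp; omega
      rw [hm, List.range_succ_eq_map, List.countP_cons, List.countP_map]
      have hshift : (pvPp prev (a :: s)) ∘ Nat.succ = pvPp (some a) s := by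
        funext k; exact pvPp_succ prev a s k
      rw [hshift]
      have hhead : pvPp prev (a :: s) 0 = decide (2 ≤ pvLead a s ∧ prev ≠ some a) := by
        rw [pvPp]
        simp only [List.getD_cons_zero, List.getD_cons_succ]
        have hiff := pvTwoLead a s h2
        rw [Bool.eq_iff_iff]
        simp only [Bool.and_eq_true, beq_iff_eq, bne_iff_ne, ne_eq, decide_eq_true_eq, hiff]
        constructor
        · rintro ⟨⟨x, y⟩, z⟩; exact ⟨⟨x.symm, x ▸ y.symm⟩, fun hp => z (by simp [hp])⟩
        · rintro ⟨⟨x, y⟩, z⟩; exact ⟨⟨x.symm, x.trans y.symm⟩, by simp [z]⟩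
      rw [hhead]
      push_cast
      rw [ih (some a)]
      by_cases hc : 2 ≤ pvLead a s ∧ prev ≠ some a
      · rw [if_pos hc]; simp [hc]; ring
      · rw [if_neg hc]; simp [hc]
    · have hm : (a :: s).length - 2 = 0 := by simp; omega
      rw [hm]
      have hh : ¬ (2 ≤ pvLead a s ∧ prev ≠ some a) := by
        intro ⟨hl, _⟩
        have := pvLead_le a s
        omega
      rw [if_neg hh, ← ih (some a)]
      have h0 : s.length - 2 = 0 := by omega
      simp [h0]

lemma pvIdx (s : List Char) (k : Nat) :
    ((PySem.List.pyGetD s ((k : Int)) ' ' == PySem.List.pyGetD s ((k : Int) + 1) ' ' &&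
      PySem.List.pyGetD s ((k : Int) + 1) ' ' == PySem.List.pyGetD s ((k : Int) + 2) ' ') &&
     ((k : Int) == 0 || PySem.List.pyGetD s ((k : Int) - 1) ' ' != PySem.List.pyGetD s ((k : Int)) ' '))
    = pvPp none s k := by
  have e1 : ((k : Int) + 1) = ((k + 1 : Nat) : Int) := by push_cast; ring
  have e2 : ((k : Int) + 2) = ((k + 2 : Nat) : Int) := by push_cast; ring
  rw [e1, e2, PySem.List.pyGetD_natCast, PySem.List.pyGetD_natCast, PySem.List.pyGetD_natCast]
  cases k with
  | zero => simp [pvPp]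
  | succ j =>
    have e3 : (((j + 1 : Nat) : Int) - 1) = ((j : Nat) : Int) := by push_cast; ring
    rw [e3, PySem.List.pyGetD_natCast]
    have h0 : (((j : Nat) : Int) + 1 == 0) = false := by
      rw [beq_eq_false_iff_ne]; omega
    simp [pvPp, h0]

lemma pvB_core (s : List Char) :
    (PySem.List.pyRange 0 ((s.length : Int) - 2) 1).foldl
      (fun cnt i =>
        if ((PySem.List.pyGetD s i ' ' == PySem.List.pyGetD s (i + 1) ' ' &&
             PySem.List.pyGetD s (i + 1) ' ' == PySem.List.pyGetD s (i + 2) ' ') &&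
            (i == 0 || PySem.List.pyGetD s (i - 1) ' ' != PySem.List.pyGetD s i ' '))
        then cnt + 1 else cnt) 0
    = (((List.range (s.length - 2)).countP (pvPp none s) : Nat) : Int) := by
  rw [PySem.List.pyRange_one, List.foldl_map, PySem.List.foldl_count_if]
  rw [zero_add]
  have hm : (((s.length : Int) - 2) - 0).toNat = s.length - 2 := by omega
  rw [hm]
  congr 1
  apply List.countP_congr
  intro k hk
  rw [zero_add, pvIdx s k]

-- ===== VERDICT (by name: the statement is the Claim_ definition above) =====
theorem countCharacterFlooding_spec : Claim_equal_countCharacterFlooding := by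
  intro text _
  unfold Spec_countCharacterFlooding countCharacterFlooding countCharacterFlooding_alt
  rw [pvB_core, pvCnt_eq]
  exact pvMain _
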